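-- pv_equiv track=rewrite | github.com/DmitriiRus37/sea_battle | validation.py | parse_ship_cells
-- ===== SOURCE A (Python) =====
-- def parse_ship_cells(sh: str):
--     cells_list = []
--     cur_cell = ''
--     for ch in sh:
--         if ch.isalpha():
--             if cur_cell != '':
--                 cells_list.append(cur_cell)
--             cur_cell = ch
--         else:
--             cur_cell += ch
--     cells_list.append(cur_cell)
--     return cells_list
-- ===== SOURCE B (Python) =====
-- def parse_ship_cells(sh: str):
--     # Build the cells back-to-front: scan reversed, closing a cell at each alpha.
--     done = []
--     buf = []  # chars of the pending trailing segment, collected right-to-left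
--     for ch in reversed(sh):
--         if ch.isalpha():
--             done.append(ch + ''.join(reversed(buf)))
--             buf.clear()
--         else:
--             buf.append(ch)
--     done.reverse()
--     head = ''.join(reversed(buf))
--     return done if (done and head == '') else [head] + done
-- ===== Notes on version B (the rewrite author's own statement) =====
-- stated objective: alternative
-- what changed: B scans the string in reverse and builds the cell list back-to-front, closing a cell at each alphabetic character, instead of A's forward accumulator with a flush-on-alpha and a final append.
import Mathlib
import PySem

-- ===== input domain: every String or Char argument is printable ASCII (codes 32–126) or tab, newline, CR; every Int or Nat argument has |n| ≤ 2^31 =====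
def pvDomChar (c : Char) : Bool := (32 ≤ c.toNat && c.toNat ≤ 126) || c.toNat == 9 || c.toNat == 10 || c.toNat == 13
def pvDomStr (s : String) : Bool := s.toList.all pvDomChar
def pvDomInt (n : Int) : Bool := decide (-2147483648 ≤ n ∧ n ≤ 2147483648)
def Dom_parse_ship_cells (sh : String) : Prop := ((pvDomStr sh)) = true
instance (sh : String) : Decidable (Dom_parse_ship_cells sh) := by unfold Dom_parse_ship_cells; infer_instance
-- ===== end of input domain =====

-- B scans the string in reverse and builds the cell list back-to-front (alternative
-- decomposition, no flush-on-alpha of a pending cell); same return value as A everywhere.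

-- ===== PORT A =====
-- A's loop: state (cells_list, cur_cell); strings ported as List Char, joined at the end.
def psAGo : List (List Char) → List Char → List Char → List (List Char)
  | cells, cur, [] => cells ++ [cur]              -- final `cells_list.append(cur_cell)`
  | cells, cur, c :: t =>
    if PySem.Chars.isalpha c then
      psAGo (if cur ≠ [] then cells ++ [cur] else cells) [c] t
    else
      psAGo cells (cur ++ [c]) t

def parse_ship_cells (sh : String) : List String :=
  (psAGo [] [] sh.toList).map String.ofList

-- ===== PORT B =====
-- B's loop over reversed(sh): foldl over sh.toList.reverse; state (done, buf),
-- buf holds the pending segment's chars right-to-left (''.join(reversed(buf)) = buf.reverse).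
def psBStep (st : List (List Char) × List Char) (c : Char) : List (List Char) × List Char :=
  if PySem.Chars.isalpha c then (st.1 ++ [c :: st.2.reverse], []) else (st.1, st.2 ++ [c])

def parse_ship_cells_alt (sh : String) : List String :=
  let st := sh.toList.reverse.foldl psBStep ([], [])
  let done := st.1.reverse
  let head := st.2.reverse
  (if done ≠ [] ∧ head = [] then done else head :: done).map String.ofList

-- ===== PRECONDITION & SPEC =====
def Spec_parse_ship_cells (sh : String) (out : List String) : Prop := out = parse_ship_cells_alt sh
instance (sh : String) (out : List String) : Decidable (Spec_parse_ship_cells sh out) := by unfold Spec_parse_ship_cells; infer_instance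

-- ===== CLAIM (what is proved, stated in full; the proofs are below) =====
def Claim_equal_parse_ship_cells : Prop := ∀ (sh : String), Dom_parse_ship_cells sh → Spec_parse_ship_cells sh (parse_ship_cells sh)

-- ===== LEMMAS AND PROOFS =====

-- Reference right fold: (pending head segment, closed cells), both left-to-right.
def psBGo : List Char → List Char × List (List Char)
  | [] => ([], [])
  | c :: t =>
    let r := psBGo t
    if PySem.Chars.isalpha c then ([], (c :: r.1) :: r.2)
    else (c :: r.1, r.2)

-- Merging a pending cell `cur` into (head, done) gives A's remaining output.
def psMerge (cur : List Char) (r : List Char × List (List Char)) : List (List Char) :=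
  if r.2 = [] then [cur ++ r.1]
  else if cur ++ r.1 = [] then r.2 else (cur ++ r.1) :: r.2

theorem psAGo_eq_merge (l : List Char) : ∀ (cells : List (List Char)) (cur : List Char),
    psAGo cells cur l = cells ++ psMerge cur (psBGo l) := by
  induction l with
  | nil => intro cells cur; simp [psAGo, psBGo, psMerge]
  | cons c t ih =>
    intro cells cur
    by_cases h : PySem.Chars.isalpha c = true
    · have hB : psBGo (c :: t) = ([], (c :: (psBGo t).1) :: (psBGo t).2) := by
        simp [psBGo, h]
      have hf : psMerge [c] (psBGo t) = (c :: (psBGo t).1) :: (psBGo t).2 := by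
        unfold psMerge
        rcases (psBGo t).2 with _ | _ <;> simp
      rw [show psAGo cells cur (c :: t)
            = psAGo (if cur ≠ [] then cells ++ [cur] else cells) [c] t from by
            simp [psAGo, h],
          ih, hf, hB]
      unfold psMerge
      by_cases hc : cur = [] <;> simp [hc]
    · have hB : psBGo (c :: t) = (c :: (psBGo t).1, (psBGo t).2) := by
        simp [psBGo, h]
      rw [show psAGo cells cur (c :: t) = psAGo cells (cur ++ [c]) t from by
            simp [psAGo, h],
          ih, hB]
      unfold psMerge
      simp

theorem psMerge_nil (r : List Char × List (List Char)) :
    psMerge [] r = if r.2 ≠ [] ∧ r.1 = [] then r.2 else r.1 :: r.2 := by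
  unfold psMerge
  rcases r.2 with _ | _ <;> by_cases h1 : r.1 = [] <;> simp [h1]

-- B's reversed left fold carries exactly psBGo's components, each reversed.
theorem psFoldl_rev_eq (l : List Char) :
    l.reverse.foldl psBStep ([], []) = ((psBGo l).2.reverse, (psBGo l).1.reverse) := by
  induction l with
  | nil => simp [psBGo]
  | cons c t ih =>
    rw [List.reverse_cons, List.foldl_append, ih]
    by_cases h : PySem.Chars.isalpha c = true <;>
      simp [psBStep, psBGo, h]

-- ===== VERDICT (by name: the statement is the Claim_ definition above) =====
theorem parse_ship_cells_spec : Claim_equal_parse_ship_cells := by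
  intro sh _
  unfold Spec_parse_ship_cells parse_ship_cells parse_ship_cells_alt
  rw [psFoldl_rev_eq, psAGo_eq_merge, psMerge_nil]
  simp
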